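-- pv_equiv track=rewrite | github.com/danvinicius/exercicios-ufrrj | monitoria/prova/q2.py | lerString
-- ===== SOURCE A (Python) =====
-- def lerString(frase):
--     stringResposta = ""
--     for index, letra in enumerate(frase):
--         if index == 0:
--             stringResposta += letra
--         else:
--             if letra == " ":
--                 if frase[index - 1] in ".;,?!":
--                     stringResposta += frase[index + 1].capitalize()
--                 else:
--                     stringResposta += frase[index + 1]
--     return stringResposta
-- ===== SOURCE B (Python) =====
-- def lerString(frase):
--     if not frase:
--         return ""
--     res = frase[0]
--     pos = frase.find(' ', 1)
--     while pos != -1: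
--         if pos + 1 < len(frase):
--             nxt = frase[pos + 1]
--             if frase[pos - 1] in ".;,?!":
--                 nxt = nxt.capitalize()
--             res += nxt
--         pos = frase.find(' ', pos + 1)
--     return res
-- ===== Notes on version B (the rewrite author's own statement) =====
-- stated objective: alternative
-- what changed: B jumps from space to space with str.find instead of enumerating every character with a position-0 special case, and naturally returns (skipping) where a trailing space makes A raise IndexError.
-- outside the precondition, e.g. on lerString('a '): A raises IndexError, B returns 'a'
-- crash fix: On strings of length >= 2 ending in a space A raises IndexError (frase[index+1] out of range); B returns the string built from all earlier spaces. — e.g. on lerString("a "): A raises IndexError, B returns "a"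
import Mathlib
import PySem

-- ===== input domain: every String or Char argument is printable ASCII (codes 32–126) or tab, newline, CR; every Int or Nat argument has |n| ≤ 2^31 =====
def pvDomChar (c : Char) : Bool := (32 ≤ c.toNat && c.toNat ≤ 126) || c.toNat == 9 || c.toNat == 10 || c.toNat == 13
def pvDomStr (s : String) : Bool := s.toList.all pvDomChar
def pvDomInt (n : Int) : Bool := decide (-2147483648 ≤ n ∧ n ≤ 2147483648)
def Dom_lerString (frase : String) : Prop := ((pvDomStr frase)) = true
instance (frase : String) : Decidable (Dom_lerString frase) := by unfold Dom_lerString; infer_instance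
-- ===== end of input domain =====

-- B walks the string by `find`-ing spaces instead of enumerating every character; where A raises on a
-- trailing space, B returns (see Raises_). Equivalence is claimed on Pre_ (A returns there).

-- ===== PORT A =====
-- `frase[index+1].capitalize()` on a one-character ASCII string is Char.toUpper (exact on the ASCII domain);
-- `c in ".;,?!"` for a one-character c is list membership.  Indexing uses pyGetD; Pre_ keeps it in range.
def lerString (frase : String) : String :=
  let cs := frase.toList
  String.mk ((PySem.List.enumerate cs 0).foldl (fun acc p =>
    if p.1 = 0 then acc ++ [p.2]
    else if p.2 = ' ' then
      if PySem.List.pyGetD cs (p.1 - 1) ' ' ∈ ['.', ';', ',', '?', '!'] then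
        acc ++ [(PySem.List.pyGetD cs (p.1 + 1) ' ').toUpper]
      else
        acc ++ [PySem.List.pyGetD cs (p.1 + 1) ' ']
    else acc) [])

-- ===== PORT B =====
-- frase.find(' ', j): first index >= j holding a space, none = -1.
-- Fuel (an upper bound on the remaining scan length) makes the recursion structural; it never runs out.
def findSpaceAux (cs : List Char) (j : Nat) : Nat -> Option Nat
  | 0 => none
  | fuel + 1 =>
    if j < cs.length then
      if cs.getD j 'x' = ' ' then some j else findSpaceAux cs (j + 1) fuel
    else none

def findSpaceFrom (cs : List Char) (j : Nat) : Option Nat :=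
  findSpaceAux cs j (cs.length - j)

def lerStringAltAux (cs : List Char) : Nat -> Nat -> List Char -> List Char
  | 0, _, acc => acc
  | fuel + 1, pos, acc =>
    match findSpaceFrom cs (pos + 1) with
    | none => acc
    | some p =>
      let acc' :=
        if p + 1 < cs.length then
          let nxt := cs.getD (p + 1) ' '
          let nxt := if cs.getD (p - 1) ' ' ∈ ['.', ';', ',', '?', '!'] then nxt.toUpper else nxt
          acc ++ [nxt]
        else acc
      lerStringAltAux cs fuel p acc'

def lerString_alt (frase : String) : String :=
  match frase.toList with
  | [] => ""
  | c :: _ => String.mk (lerStringAltAux frase.toList frase.toList.length 0 [c])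

-- ===== PRECONDITION & SPEC =====
-- Pre_ excludes exactly the strings (length ≥ 2, trailing space) on which A raises IndexError.
def Pre_lerString (frase : String) : Prop :=
  ¬ (2 ≤ frase.toList.length ∧ frase.toList.getLast? = some ' ')
instance (frase : String) : Decidable (Pre_lerString frase) := by unfold Pre_lerString; infer_instance
def pvWitness_lerString : String := "ola. tudo bem? sim"

-- On strings of length ≥ 2 ending in a space A raises IndexError; B returns the string built from all earlier spaces.
def Raises_lerString (frase : String) : Prop :=
  2 ≤ frase.toList.length ∧ frase.toList.getLast? = some ' '
instance (frase : String) : Decidable (Raises_lerString frase) := by unfold Raises_lerString; infer_instance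
def pvRaiseWitness_lerString : String := "a "
def pvRaiseWitnessOut_lerString : String := "a"

def Spec_lerString (frase : String) (out : String) : Prop := out = lerString_alt frase
instance (frase : String) (out : String) : Decidable (Spec_lerString frase out) := by unfold Spec_lerString; infer_instance

-- ===== CLAIM (what is proved, stated in full; the proofs are below) =====
def Claim_equal_lerString : Prop := ∀ (frase : String), Dom_lerString frase → Pre_lerString frase → Spec_lerString frase (lerString frase)
def Claim_raises_lerString : Prop := (∀ (frase : String), Dom_lerString frase → Raises_lerString frase → ¬ Pre_lerString frase) ∧ (Dom_lerString (pvRaiseWitness_lerString) ∧ Raises_lerString (pvRaiseWitness_lerString) ∧ lerString_alt (pvRaiseWitness_lerString) = pvRaiseWitnessOut_lerString)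

-- ===== LEMMAS AND PROOFS =====

def pvPunct : List Char := ['.', ';', ',', '?', '!']

-- the character A/B append for a space at position i (total form, defaults never used inside Pre_)
def pvOut (cs : List Char) (i : Nat) : Char :=
  if cs.getD (i - 1) ' ' ∈ pvPunct then (cs.getD (i + 1) ' ').toUpper else cs.getD (i + 1) ' '

-- list of positions j' ≥ j holding a space, in increasing order
def spacesFrom (cs : List Char) (j : Nat) : List Nat :=
  if _h : j < cs.length then
    (if cs.getD j 'x' = ' ' then [j] else []) ++ spacesFrom cs (j + 1)
  else []
termination_by cs.length - j

def emitB (cs : List Char) (p : Nat) : List Char :=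
  if p + 1 < cs.length then [pvOut cs p] else []

def gA (cs : List Char) (p : Int × Char) : List Char :=
  if p.1 = 0 then [p.2]
  else if p.2 = ' ' then
    [if PySem.List.pyGetD cs (p.1 - 1) ' ' ∈ ['.', ';', ',', '?', '!'] then
       (PySem.List.pyGetD cs (p.1 + 1) ' ').toUpper
     else PySem.List.pyGetD cs (p.1 + 1) ' ']
  else []

theorem spacesFrom_stop (cs : List Char) (j : Nat) (h : ¬ j < cs.length) :
    spacesFrom cs j = [] := by
  rw [spacesFrom]; simp [h]

theorem spacesFrom_mem (cs : List Char) (j i : Nat) (h : i ∈ spacesFrom cs j) :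
    j ≤ i ∧ i < cs.length ∧ cs.getD i 'x' = ' ' := by
  induction hn : cs.length - j using Nat.strong_induction_on generalizing j with
  | _ n ih =>
    rw [spacesFrom] at h
    split at h
    · rcases List.mem_append.mp h with h1 | h2
      · split_ifs at h1 with hs
        · simp at h1; subst h1; exact ⟨le_refl _, by omega, hs⟩
        · simp at h1
      · have := ih (cs.length - (j + 1)) (by omega) (j + 1) h2 rfl
        exact ⟨by omega, this.2.1, this.2.2⟩
    · simp at h

theorem spacesFrom_cons (cs : List Char) (j p : Nat) (rest : List Nat)
    (h : spacesFrom cs j = p :: rest) : j ≤ p ∧ rest = spacesFrom cs (p + 1) := by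
  induction hn : cs.length - j using Nat.strong_induction_on generalizing j with
  | _ n ih =>
    rw [spacesFrom] at h
    split at h
    · split_ifs at h with hs
      · simp at h
        cases h.1
        exact ⟨le_refl _, h.2.symm⟩
      · simp at h
        have := ih (cs.length - (j + 1)) (by omega) (j + 1) h rfl
        exact ⟨by omega, this.2⟩
    · simp at h

theorem findSpaceAux_eq_head (cs : List Char) :
    ∀ (fuel j : Nat), cs.length - j ≤ fuel →
      findSpaceAux cs j fuel = (spacesFrom cs j).head? := by
  intro fuel
  induction fuel with
  | zero =>
    intro j h
    have hj : ¬ j < cs.length := by omega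
    simp [findSpaceAux, spacesFrom_stop cs j hj]
  | succ f ih =>
    intro j h
    by_cases hj : j < cs.length
    · by_cases hs : cs.getD j 'x' = ' '
      · rw [spacesFrom, dif_pos hj, if_pos hs]
        simp only [findSpaceAux]
        rw [if_pos hj, if_pos hs]
        simp
      · rw [spacesFrom, dif_pos hj, if_neg hs]
        simp only [findSpaceAux]
        rw [if_pos hj, if_neg hs, List.nil_append]
        exact ih (j + 1) (by omega)
    · simp only [findSpaceAux]
      rw [if_neg hj, spacesFrom_stop cs j hj]
      simp

theorem altAux_eq (cs : List Char) :
    ∀ (fuel pos : Nat) (acc : List Char), cs.length - (pos + 1) ≤ fuel →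
      lerStringAltAux cs fuel pos acc = acc ++ (spacesFrom cs (pos + 1)).flatMap (emitB cs) := by
  intro fuel
  induction fuel with
  | zero =>
    intro pos acc h
    have := spacesFrom_stop cs (pos + 1) (by omega)
    simp [lerStringAltAux, this]
  | succ f ih =>
    intro pos acc h
    have hfind : findSpaceFrom cs (pos + 1) = (spacesFrom cs (pos + 1)).head? :=
      findSpaceAux_eq_head cs (cs.length - (pos + 1)) (pos + 1) (le_refl _)
    cases hsp : spacesFrom cs (pos + 1) with
    | nil =>
      rw [lerStringAltAux, hfind, hsp]
      simp
    | cons p rest =>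
      obtain ⟨hle, hrest⟩ := spacesFrom_cons cs (pos + 1) p rest hsp
      have hp := spacesFrom_mem cs (pos + 1) p (by rw [hsp]; exact List.mem_cons_self ..)
      rw [lerStringAltAux, hfind, hsp]
      simp only [List.head?]
      rw [ih p _ (by omega)]
      rw [← hrest, List.flatMap_cons]
      have hacc : (if p + 1 < cs.length then
            acc ++ [if cs.getD (p - 1) ' ' ∈ ['.', ';', ',', '?', '!'] then
                      (cs.getD (p + 1) ' ').toUpper else cs.getD (p + 1) ' ']
          else acc) = acc ++ emitB cs p := by
        unfold emitB pvOut pvPunct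
        split_ifs <;> simp_all
      simp only [hacc, List.append_assoc]

theorem gA_zero (cs : List Char) (c : Char) : gA cs (0, c) = [c] := by simp [gA]

theorem enum_flatMap (cs : List Char) :
    ∀ (l : List Char) (j : Nat), 1 ≤ j → l = cs.drop j →
      (PySem.List.enumerate l (j : Int)).flatMap (gA cs)
        = (spacesFrom cs j).flatMap (fun i => [pvOut cs i]) := by
  intro l
  induction l with
  | nil =>
    intro j hj hdrop
    have hlen : cs.length ≤ j := List.drop_eq_nil_iff.mp hdrop.symm
    rw [spacesFrom_stop cs j (by omega)]
    simp [PySem.List.enumerate_nil]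
  | cons x t iht =>
    intro j hj hdrop
    have hjlen : j < cs.length := by
      by_contra hc
      rw [List.drop_eq_nil_of_le (by omega)] at hdrop
      simp at hdrop
    have h1 : cs[j]? = some x := by
      have h0 : (cs.drop j)[0]? = some x := by rw [← hdrop]; rfl
      rwa [List.getElem?_drop, Nat.add_zero] at h0
    have hx : x = cs.getD j 'x' := by
      simp [List.getD_eq_getElem?_getD, h1]
    have ht : t = cs.drop (j + 1) := by
      have h1 : (cs.drop j).tail = t := by rw [← hdrop]; rfl
      rw [List.tail_drop] at h1; exact h1.symm
    rw [PySem.List.enumerate_cons, List.flatMap_cons]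
    have hcast : (j : Int) + 1 = ((j + 1 : Nat) : Int) := by push_cast; ring
    rw [hcast, iht (j + 1) (by omega) ht]
    conv_rhs => rw [spacesFrom]
    rw [dif_pos hjlen]
    have hgA : gA cs ((j : Int), x) = if cs.getD j 'x' = ' ' then [pvOut cs j] else [] := by
      have hj0 : ((j : Int) = 0) = False := by simp; omega
      have hm1 : (j : Int) - 1 = ((j - 1 : Nat) : Int) := by omega
      have hp1 : (j : Int) + 1 = ((j + 1 : Nat) : Int) := by omega
      simp only [gA, hj0, if_false, hm1, hp1, PySem.List.pyGetD_natCast]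
      rw [hx]
      unfold pvOut pvPunct
      rfl
    rw [hgA, ← hx]
    split_ifs with hs <;> simp

theorem flatMap_congr_mem {α β : Type} (l : List α) (f g : α → List β)
    (h : ∀ x ∈ l, f x = g x) : l.flatMap f = l.flatMap g := by
  induction l with
  | nil => rfl
  | cons x t ih =>
    simp only [List.flatMap_cons]
    rw [h x (List.mem_cons_self ..), ih (fun y hy => h y (List.mem_cons_of_mem _ hy))]

theorem lerString_eq (frase : String) (c : Char) (t : List Char) (hcs : frase.toList = c :: t) :
    lerString frase = String.mk ([c] ++ (spacesFrom frase.toList 1).flatMap (fun i => [pvOut frase.toList i])) := by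
  unfold lerString
  have hbody : (fun (acc : List Char) (p : Int × Char) =>
      if p.1 = 0 then acc ++ [p.2]
      else if p.2 = ' ' then
        if PySem.List.pyGetD frase.toList (p.1 - 1) ' ' ∈ ['.', ';', ',', '?', '!'] then
          acc ++ [(PySem.List.pyGetD frase.toList (p.1 + 1) ' ').toUpper]
        else acc ++ [PySem.List.pyGetD frase.toList (p.1 + 1) ' ']
      else acc) = (fun acc p => acc ++ gA frase.toList p) := by
    funext acc p
    unfold gA
    split_ifs <;> simp
  simp only [hbody, PySem.List.foldl_append_eq_flatMap, List.nil_append]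
  have h01 : (0 : Int) + 1 = ((1 : Nat) : Int) := by norm_num
  rw [hcs, PySem.List.enumerate_cons, List.flatMap_cons, gA_zero, h01,
    enum_flatMap (c :: t) t 1 (le_refl _) rfl]

theorem lerString_alt_eq (frase : String) (c : Char) (t : List Char) (hcs : frase.toList = c :: t) :
    lerString_alt frase = String.mk ([c] ++ (spacesFrom frase.toList 1).flatMap (emitB frase.toList)) := by
  unfold lerString_alt
  rw [hcs]
  simp only
  rw [← hcs, altAux_eq frase.toList frase.toList.length 0 [c] (by omega)]

-- ===== VERDICT (by name: the statement is the Claim_ definition above) =====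
theorem lerString_spec : Claim_equal_lerString := by
  intro frase _ hpre
  unfold Spec_lerString
  cases hcs : frase.toList with
  | nil =>
    unfold lerString lerString_alt
    rw [hcs]
    simp [PySem.List.enumerate_nil]
    rfl
  | cons c t =>
    rw [lerString_eq frase c t hcs, lerString_alt_eq frase c t hcs]
    congr 1
    refine congrArg _ ?_
    refine (flatMap_congr_mem _ _ _ ?_).symm
    intro i hi
    obtain ⟨h1, h2, h3⟩ := spacesFrom_mem frase.toList 1 i hi
    unfold emitB
    have hlt : i + 1 < frase.toList.length := by
      by_contra hc
      have hieq : i = frase.toList.length - 1 := by omega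
      apply hpre
      constructor
      · omega
      · rw [List.getLast?_eq_getElem?]
        have hg : frase.toList.getD i 'x' = frase.toList[i] := by
          rw [List.getD_eq_getElem?_getD, List.getElem?_eq_getElem h2]; rfl
        have : frase.toList[i]? = some ' ' := by
          rw [List.getElem?_eq_getElem h2, ← hg, h3]
        rw [← hieq]
        exact this
    rw [if_pos hlt]

def lerString_raises : Claim_raises_lerString := by
  unfold Claim_raises_lerString
  exact ⟨by intro f _ h hp; exact hp h, by decide⟩
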